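-- pv_equiv track=rewrite | github.com/OpenBlatam/IA-Models-Clone | Frontier-Model-run/scripts/TruthGPT-main/optimization_core/ultimate/core/analytics.py | _combine_anomaly_results
-- ===== SOURCE A (Python) =====
-- from typing import Dict, List, Tuple, Optional, Any, Union
--
-- def _combine_anomaly_results(all_anomalies: List[int],
--                            data_length: int) -> List[int]:
--     """Combine results from multiple algorithms"""
--     # Count votes for each data point
--     votes = [0] * data_length
--     for anomaly in all_anomalies:
--         if 0 <= anomaly < data_length:
--             votes[anomaly] += 1
--
--     # Points with majority vote are considered anomalies
--     threshold = len(set(all_anomalies)) // 2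
--     combined_anomalies = [i for i, vote_count in enumerate(votes) if vote_count > threshold]
--
--     return combined_anomalies
-- ===== SOURCE B (Python) =====
-- def _combine_anomaly_results(all_anomalies, data_length):
--     """Combine results from multiple algorithms"""
--     threshold = len(set(all_anomalies)) // 2
--     # sort the in-range anomalies, then a single run-length pass over the
--     # sorted list: a run longer than the threshold is a combined anomaly
--     valid = sorted(a for a in all_anomalies if 0 <= a < data_length)
--     out = []
--     cur = None
--     run = 0
--     for v in valid:
--         if run > 0 and cur == v:
--             run += 1
--         else:
--             if run > threshold:
--                 out.append(cur)
--             cur = v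
--             run = 1
--     if run > threshold:
--         out.append(cur)
--     return out
-- ===== Notes on version B (the rewrite author's own statement) =====
-- stated objective: alternative
-- what changed: Replaces per-index vote counting (a dense data_length-sized array filled by one pass and then scanned at every position) with sort-then-run-length-scan: the in-range anomalies are sorted and a single pass over the sorted list measures each run of equal values, emitting the value when the run exceeds the majority threshold; no counting structure or per-position scan exists.
import Mathlib
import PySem

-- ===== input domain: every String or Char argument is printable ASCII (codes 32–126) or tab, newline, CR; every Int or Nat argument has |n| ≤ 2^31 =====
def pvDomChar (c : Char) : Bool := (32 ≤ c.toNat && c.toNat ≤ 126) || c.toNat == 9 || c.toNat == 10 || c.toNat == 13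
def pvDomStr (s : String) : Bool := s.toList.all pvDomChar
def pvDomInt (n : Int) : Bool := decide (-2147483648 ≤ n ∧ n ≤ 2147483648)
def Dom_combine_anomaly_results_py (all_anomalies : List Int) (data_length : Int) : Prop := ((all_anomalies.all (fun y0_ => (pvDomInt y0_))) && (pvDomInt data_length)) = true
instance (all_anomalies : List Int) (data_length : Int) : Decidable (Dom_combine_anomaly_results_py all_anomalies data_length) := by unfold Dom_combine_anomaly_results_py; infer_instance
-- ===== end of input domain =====

-- B replaces A's dense per-index vote array (filled, then scanned at every position)
-- by sorting the in-range anomalies and one run-length pass over the sorted list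
-- (objective: alternative algorithm).

-- ===== PORT A =====
def combine_anomaly_results_py (all_anomalies : List Int) (data_length : Int) : List Int :=
  -- votes = [0] * data_length; for anomaly in all_anomalies: if 0 <= anomaly < data_length: votes[anomaly] += 1
  let votes := all_anomalies.foldl
    (fun v a => if 0 ≤ a ∧ a < data_length
       then PySem.List.pySetD v a (PySem.List.pyGetD v a 0 + 1) else v)
    (PySem.List.pyRepeat [(0 : Int)] data_length)
  -- threshold = len(set(all_anomalies)) // 2
  let threshold := PySem.Int.floordiv (PySem.Set.len (PySem.Set.ofList all_anomalies)) 2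
  -- [i for i, vote_count in enumerate(votes) if vote_count > threshold]
  -- (the comprehension's enumerate is ported as an index-carrying fold so that it
  --  evaluates iteratively; pv_foldl_comprehension_eq_enumerate proves it IS
  --  filter/map over PySem.List.enumerate)
  (votes.foldl (fun (st : List Int × Int) vc =>
      (if threshold < vc then st.1 ++ [st.2] else st.1, st.2 + 1)) ([], 0)).1

-- ===== PORT B =====
def combine_anomaly_results_py_alt (all_anomalies : List Int) (data_length : Int) : List Int :=
  -- threshold = len(set(all_anomalies)) // 2
  let threshold := PySem.Int.floordiv (PySem.Set.len (PySem.Set.ofList all_anomalies)) 2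
  -- valid = sorted(a for a in all_anomalies if 0 <= a < data_length)
  let valid := PySem.List.sorted
    (all_anomalies.filter (fun a => decide (0 ≤ a ∧ a < data_length))) (fun x => x)
  -- out = []; cur = None; run = 0
  -- for v in valid: if run > 0 and cur == v: run += 1
  --                 else: (if run > threshold: out.append(cur)); cur = v; run = 1
  let st := valid.foldl
    (fun (st : List Int × Option Int × Int) v =>
      if 0 < st.2.2 ∧ st.2.1 = some v then (st.1, st.2.1, st.2.2 + 1)
      else ((if threshold < st.2.2 then st.1 ++ st.2.1.toList else st.1), some v, 1))
    ([], none, 0)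
  -- if run > threshold: out.append(cur)
  if threshold < st.2.2 then st.1 ++ st.2.1.toList else st.1

-- ===== PRECONDITION & SPEC =====
def Spec_combine_anomaly_results_py (all_anomalies : List Int) (data_length : Int) (out : List Int) : Prop := out = combine_anomaly_results_py_alt all_anomalies data_length
instance (all_anomalies : List Int) (data_length : Int) (out : List Int) : Decidable (Spec_combine_anomaly_results_py all_anomalies data_length out) := by unfold Spec_combine_anomaly_results_py; infer_instance

-- ===== CLAIM (what is proved, stated in full; the proofs are below) =====
def Claim_equal_combine_anomaly_results_py : Prop := ∀ (all_anomalies : List Int) (data_length : Int), Dom_combine_anomaly_results_py all_anomalies data_length → Spec_combine_anomaly_results_py all_anomalies data_length (combine_anomaly_results_py all_anomalies data_length)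

-- ===== LEMMAS AND PROOFS =====

-- The loop body and the final flush of B's run-length pass, named for the proofs.
def pvStep (thr : Int) (st : List Int × Option Int × Int) (v : Int) :
    List Int × Option Int × Int :=
  if 0 < st.2.2 ∧ st.2.1 = some v then (st.1, st.2.1, st.2.2 + 1)
  else ((if thr < st.2.2 then st.1 ++ st.2.1.toList else st.1), some v, 1)

def pvFlush (thr : Int) (st : List Int × Option Int × Int) : List Int :=
  if thr < st.2.2 then st.1 ++ st.2.1.toList else st.1

theorem pv_alt_eq (all_anomalies : List Int) (data_length : Int) :
    combine_anomaly_results_py_alt all_anomalies data_length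
      = pvFlush (PySem.Int.floordiv (PySem.Set.len (PySem.Set.ofList all_anomalies)) 2)
          ((PySem.List.sorted
              (all_anomalies.filter (fun a => decide (0 ≤ a ∧ a < data_length)))
              (fun x => x)).foldl
            (pvStep (PySem.Int.floordiv (PySem.Set.len (PySem.Set.ofList all_anomalies)) 2))
            ([], none, 0)) := rfl

-- The index-carrying fold used for A's comprehension is filter/map over enumerate.
theorem pv_foldl_comprehension_eq_enumerate (p : Int → Prop) [DecidablePred p]
    (xs : List Int) :
    ∀ (s : Int) (acc : List Int),
      (xs.foldl (fun (st : List Int × Int) vc =>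
          (if p vc then st.1 ++ [st.2] else st.1, st.2 + 1)) (acc, s)).1
        = acc ++ ((PySem.List.enumerate xs s).filter (fun q => decide (p q.2))).map
            (fun q => q.1) := by
  induction xs with
  | nil => intro s acc; simp
  | cons b t ih =>
      intro s acc
      rw [PySem.List.enumerate_cons]
      by_cases hb : p b
      · simp only [List.foldl_cons, hb, if_true, List.filter_cons, ih]
        simp
      · simp only [List.foldl_cons, hb, List.filter_cons, ih]
        simp

-- The vote-increment loop preserves the list length.
theorem pv_votes_length (ys : List Int) (v : List Int) :
    (ys.foldl (fun v a => PySem.List.pySetD v a (PySem.List.pyGetD v a 0 + 1)) v).length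
      = v.length := by
  induction ys generalizing v with
  | nil => rfl
  | cons b t ih =>
      simp only [List.foldl_cons]
      rw [ih]
      exact PySem.List.length_pySetD v b _

-- After the vote-increment loop over in-range indices, slot n holds its initial
-- value plus the number of occurrences of n.
theorem pv_votes_getD (ys : List Int) (v : List Int) (n : Int)
    (hys : ∀ a ∈ ys, 0 ≤ a ∧ a < (v.length : Int))
    (hn0 : 0 ≤ n) (hnL : n < (v.length : Int)) :
    PySem.List.pyGetD
        (ys.foldl (fun v a => PySem.List.pySetD v a (PySem.List.pyGetD v a 0 + 1)) v) n 0
      = PySem.List.pyGetD v n 0 + ys.count n := by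
  induction ys generalizing v with
  | nil => simp
  | cons b t ih =>
      obtain ⟨hb0, hbL⟩ := hys b (List.mem_cons_self ..)
      simp only [List.foldl_cons]
      have hblen : b.toNat < v.length := by omega
      have hrec := ih (PySem.List.pySetD v b (PySem.List.pyGetD v b 0 + 1)) ?_ ?_
      · rw [hrec]
        have hb' : b = ((b.toNat : Nat) : Int) := by omega
        have hn' : n = ((n.toNat : Nat) : Int) := by omega
        rw [hb', hn', PySem.List.pyGetD_pySetD_natCast v b.toNat n.toNat _ _ hblen]
        by_cases h : n.toNat = b.toNat
        · have hnb : b = n := by omega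
          simp only [h, hnb, List.count_cons, beq_self_eq_true, if_true]
          push_cast
          ring
        · have hnb : ¬ (b = n) := by omega
          simp only [List.count_cons, beq_iff_eq]
          simp [h]
          omega
      · intro a ha
        have := hys a (List.mem_cons_of_mem _ ha)
        rwa [PySem.List.length_pySetD]
      · rwa [PySem.List.length_pySetD]

-- The threshold len(set(xs)) // 2 is nonnegative.
theorem pv_threshold_nonneg (xs : List Int) :
    0 ≤ PySem.Int.floordiv (PySem.Set.len (PySem.Set.ofList xs)) 2 := by
  rw [PySem.Int.floordiv_eq_ediv_of_pos (by norm_num)]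
  have : 0 ≤ PySem.Set.len (PySem.Set.ofList xs) := by
    simp [PySem.Set.len]
  omega

-- Adding copies of an element already present leaves the set unchanged.
theorem pv_foldl_add_replicate_mem (s : List Int) (m : Nat) (c : Int) (h : c ∈ s) :
    (List.replicate m c).foldl PySem.Set.add s = s := by
  induction m with
  | zero => rfl
  | succ k ih =>
      rw [List.replicate_succ, List.foldl_cons]
      have : PySem.Set.add s c = s := by
        simp [PySem.Set.add, PySem.Set.contains, h]
      rw [this, ih]

-- Folding add from (c :: s) when c never recurs prepends c to the fold from s.
theorem pv_foldl_add_notmem (l : List Int) :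
    ∀ (s : List Int) (c : Int), c ∉ l →
    l.foldl PySem.Set.add (c :: s) = c :: l.foldl PySem.Set.add s := by
  induction l with
  | nil => intro s c _; rfl
  | cons x t ih =>
      intro s c hc
      have hxc : ¬ (x = c) := fun h => hc (h ▸ List.mem_cons_self ..)
      have hct : c ∉ t := fun h => hc (List.mem_cons_of_mem _ h)
      simp only [List.foldl_cons]
      have : PySem.Set.add (c :: s) x = c :: PySem.Set.add s x := by
        simp [PySem.Set.add, PySem.Set.contains, hxc]
        by_cases hxs : x ∈ s <;> simp [hxs]
      rw [this, ih _ _ hct]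

-- set(replicate n c ++ l) = c :: set(l) when n ≥ 1 and c ∉ l.
theorem pv_ofList_replicate_append (n : Nat) (c : Int) (l : List Int)
    (hn : 1 ≤ n) (hc : c ∉ l) :
    PySem.Set.ofList (List.replicate n c ++ l) = c :: PySem.Set.ofList l := by
  obtain ⟨m, rfl⟩ : ∃ m, n = m + 1 := ⟨n - 1, by omega⟩
  rw [PySem.Set.ofList_eq_foldl, List.foldl_append]
  have h1 : (List.replicate (m + 1) c).foldl PySem.Set.add [] = [c] := by
    rw [List.replicate_succ, List.foldl_cons]
    have : PySem.Set.add [] c = [c] := rfl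
    rw [this, pv_foldl_add_replicate_mem [c] m c (List.mem_singleton.mpr rfl)]
  rw [h1]
  have := pv_foldl_add_notmem l [] c hc
  rw [this, ← PySem.Set.ofList_eq_foldl]

-- set(xs) is a sublist of xs.
theorem pv_foldl_add_sublist (l : List Int) :
    ∀ s : List Int, List.Sublist (l.foldl PySem.Set.add s) (s ++ l) := by
  induction l with
  | nil => intro s; simp
  | cons x t ih =>
      intro s
      rw [List.foldl_cons]
      refine (ih (PySem.Set.add s x)).trans ?_
      by_cases hx : PySem.Set.contains s x = true
      · simp only [PySem.Set.add, hx, if_true]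
        exact List.Sublist.append_left (List.sublist_cons_self ..) s
      · simp only [PySem.Set.add, hx]
        simp

theorem pv_ofList_sublist (l : List Int) : List.Sublist (PySem.Set.ofList l) l := by
  have := pv_foldl_add_sublist l []
  simpa [PySem.Set.ofList_eq_foldl] using this

-- The run-length pass over a sorted tail, flushed at the end, produces the
-- distinct elements of (replicate run cur ++ xs) whose multiplicity exceeds thr.
theorem pv_scan_spec (thr : Int) (xs : List Int) :
    ∀ (out : List Int) (cur : Int) (run : Int), 1 ≤ run →
    (∀ x ∈ xs, cur ≤ x) → xs.Pairwise (· ≤ ·) →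
    pvFlush thr (xs.foldl (pvStep thr) (out, some cur, run))
      = out ++ (PySem.Set.ofList (List.replicate run.toNat cur ++ xs)).filter
          (fun k => decide (thr < (((List.replicate run.toNat cur ++ xs).count k : Nat) : Int))) := by
  induction xs with
  | nil =>
      intro out cur run hrun _ _
      simp only [List.foldl_nil, List.append_nil, pvFlush]
      have hset : PySem.Set.ofList (List.replicate run.toNat cur) = [cur] := by
        have := pv_ofList_replicate_append run.toNat cur [] (by omega) (by simp)
        simpa using this
      rw [hset]
      have hcount : (((List.replicate run.toNat cur).count cur : Nat) : Int) = run := by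
        simp
        omega
      by_cases h : thr < run
      · rw [if_pos h]
        simp only [List.filter_cons, hcount, h, decide_true, if_true]
        simp
      · rw [if_neg h]
        simp only [List.filter_cons, hcount]
        simp [h]
  | cons x t ih =>
      intro out cur run hrun hle hpw
      have hxle : cur ≤ x := hle x (List.mem_cons_self ..)
      have htle : ∀ y ∈ t, x ≤ y := fun y hy => (List.pairwise_cons.mp hpw).1 y hy
      have htpw : t.Pairwise (· ≤ ·) := (List.pairwise_cons.mp hpw).2
      rw [List.foldl_cons]
      by_cases hxc : cur = x
      · -- run continues
        have hstep : pvStep thr (out, some cur, run) x = (out, some cur, run + 1) := by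
          simp only [pvStep]
          rw [if_pos ⟨by omega, by rw [hxc]⟩]
        rw [hstep]
        rw [ih out cur (run + 1) (by omega)
          (fun y hy => le_trans hxle (hxc ▸ htle y hy)) htpw]
        have hlist : List.replicate (run + 1).toNat cur ++ t
            = List.replicate run.toNat cur ++ (x :: t) := by
          have hn : (run + 1).toNat = run.toNat + 1 := by omega
          rw [hn, List.replicate_succ', hxc]
          simp
        rw [hlist]
      · -- run ends: cur < every element of x :: t
        have hcur_lt : ∀ y ∈ x :: t, cur < y := by
          intro y hy
          rcases List.mem_cons.mp hy with rfl | hyt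
          · exact lt_of_le_of_ne hxle hxc
          · exact lt_of_lt_of_le (lt_of_le_of_ne hxle hxc) (htle y hyt)
        have hcnotin : cur ∉ x :: t := fun h => lt_irrefl cur (hcur_lt cur h)
        have hstep : pvStep thr (out, some cur, run) x
            = ((if thr < run then out ++ [cur] else out), some x, 1) := by
          simp only [pvStep]
          rw [if_neg (by rintro ⟨-, h⟩; exact hxc (Option.some.inj h))]
          simp
        rw [hstep]
        rw [ih (if thr < run then out ++ [cur] else out) x 1 (by omega) htle htpw]
        have hxt : List.replicate (1 : Int).toNat x ++ t = x :: t := by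
          simp [List.replicate_succ]
        rw [hxt]
        -- decompose the RHS set
        rw [pv_ofList_replicate_append run.toNat cur (x :: t) (by omega) hcnotin]
        rw [List.filter_cons]
        have hccount : (((List.replicate run.toNat cur ++ x :: t).count cur : Nat) : Int)
            = run := by
          rw [List.count_append, List.count_replicate]
          have h0 : (x :: t).count cur = 0 := List.count_eq_zero.mpr hcnotin
          simp [h0]
          omega
        have hfc : ∀ k ∈ PySem.Set.ofList (x :: t),
            (decide (thr < (((List.replicate run.toNat cur ++ x :: t).count k : Nat) : Int)))
              = (decide (thr < (((x :: t).count k : Nat) : Int))) := by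
          intro k hk
          have hkmem : k ∈ x :: t := (pv_ofList_sublist (x :: t)).subset hk
          have hkc : k ≠ cur := fun h => hcnotin (h ▸ hkmem)
          rw [List.count_append, List.count_replicate]
          have hck : ¬ (cur = k) := fun h => hkc h.symm
          simp [hck]
        rw [List.filter_congr hfc, hccount]
        by_cases h : thr < run
        · simp only [h, decide_true, if_true]
          simp
        · simp only [h, decide_false]
          simp

-- set of a weakly increasing list is strictly increasing.
theorem pv_pairwise_lt_of_le_nodup (l : List Int) :
    l.Pairwise (· ≤ ·) → l.Nodup → l.Pairwise (· < ·) := by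
  induction l with
  | nil => intro _ _; exact List.Pairwise.nil
  | cons a t ih =>
      intro hle hnd
      rcases List.pairwise_cons.mp hle with ⟨ha, ht⟩
      rcases List.nodup_cons.mp hnd with ⟨hna, hnd'⟩
      exact List.Pairwise.cons
        (fun y hy => lt_of_le_of_ne (ha y hy) (fun he => hna (he ▸ hy)))
        (ih ht hnd')

theorem pv_ofList_pairwise_lt (l : List Int) (h : l.Pairwise (· ≤ ·)) :
    (PySem.Set.ofList l).Pairwise (· < ·) :=
  pv_pairwise_lt_of_le_nodup _ (h.sublist (pv_ofList_sublist l)) (PySem.Set.nodup_ofList l)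

-- ===== VERDICT (by name: the statement is the Claim_ definition above) =====
theorem combine_anomaly_results_py_spec : Claim_equal_combine_anomaly_results_py := by
  intro all L _
  unfold Spec_combine_anomaly_results_py
  rw [pv_alt_eq]
  unfold combine_anomaly_results_py
  simp only [PySem.List.pyRepeat_singleton]
  set thr := PySem.Int.floordiv (PySem.Set.len (PySem.Set.ofList all)) 2 with hthr
  have hthr0 : 0 ≤ thr := pv_threshold_nonneg all
  -- A's loop runs over the in-range sublist
  rw [PySem.List.foldl_ite_eq_foldl_filter (fun a => 0 ≤ a ∧ a < L)
        (fun v a => PySem.List.pySetD v a (PySem.List.pyGetD v a 0 + 1))]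
  set ys := all.filter (fun a => decide (0 ≤ a ∧ a < L)) with hys
  have hysmem : ∀ a ∈ ys, 0 ≤ a ∧ a < L := by
    intro a ha
    rw [hys, List.mem_filter] at ha
    exact of_decide_eq_true ha.2
  rw [pv_foldl_comprehension_eq_enumerate (fun vc => thr < vc)]
  rw [List.nil_append]
  set votes := ys.foldl
      (fun v a => PySem.List.pySetD v a (PySem.List.pyGetD v a 0 + 1))
      (List.replicate L.toNat (0 : Int)) with hvotes
  have hvlen : votes.length = L.toNat := by
    rw [hvotes, pv_votes_length]; simp
  have hvget : ∀ k : Nat, k < L.toNat → votes[k]! = (ys.count (k : Int) : Int) := by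
    intro k hk
    have hlen : (List.replicate L.toNat (0:Int)).length = L.toNat := by simp
    have h := pv_votes_getD ys (List.replicate L.toNat (0:Int)) (k : Int)
      (by intro a ha
          have := hysmem a ha
          have hL : 0 < L := by omega
          constructor
          · exact this.1
          · rw [hlen]; omega)
      (by positivity) (by rw [hlen]; exact_mod_cast hk)
    rw [← hvotes] at h
    rw [PySem.List.pyGetD_natCast, PySem.List.pyGetD_natCast] at h
    have : votes.getD k 0 = votes[k]! := by
      rw [List.getD_eq_getElem?_getD, List.getElem!_eq_getElem?_getD]
      rfl
    rw [this] at h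
    rw [h]
    simp [List.getD_eq_getElem?_getD, hk]
  set Aout := ((PySem.List.enumerate votes 0).filter (fun p => decide (thr < p.2))).map
      (fun p => p.1) with hA
  -- A's output is strictly increasing
  have hApw : Aout.Pairwise (fun a b => a < b) := by
    rw [hA]
    exact List.Pairwise.map _ (fun _ _ h => h)
      ((PySem.List.pairwise_lt_enumerate votes 0).filter _)
  -- membership characterisation of A's output
  have hmemA : ∀ i : Int, i ∈ Aout ↔ thr < (ys.count i : Int) := by
    intro i
    rw [hA]
    simp only [List.mem_map, List.mem_filter]
    constructor
    · rintro ⟨p, ⟨hpe, hpf⟩, hpi⟩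
      rw [PySem.List.mem_enumerate_iff] at hpe
      obtain ⟨k, hk, rfl⟩ := hpe
      simp only [zero_add] at hpi
      have hk' : k < L.toNat := by rwa [hvlen] at hk
      have := hvget k hk'
      have hv : votes[k]! = votes[k] := by
        simp [hk]
      rw [hv] at this
      rw [this] at hpf
      rw [← hpi]
      simpa using hpf
    · intro hcnt
      have hpos : 0 < ys.count i := by
        rcases Nat.eq_zero_or_pos (ys.count i) with h | h
        · rw [h] at hcnt; simp at hcnt; omega
        · exact h
      have hiy : i ∈ ys := List.count_pos_iff.mp hpos
      obtain ⟨hi0, hiL⟩ := hysmem i hiy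
      have hk' : i.toNat < L.toNat := by omega
      refine ⟨((i.toNat : Int), votes[i.toNat]), ⟨?_, ?_⟩, by simp; omega⟩
      · rw [PySem.List.mem_enumerate_iff]
        exact ⟨i.toNat, by rwa [hvlen], by simp⟩
      · have := hvget i.toNat hk'
        have hv : votes[i.toNat]! = votes[i.toNat] := by
          simp [hvlen, hk']
        rw [hv] at this
        rw [this]
        simp only [decide_eq_true_eq]
        have : ((i.toNat : Nat) : Int) = i := by omega
        rw [this]
        exact hcnt
  -- B's side: sorted list, then the run-length pass
  set valid := PySem.List.sorted ys (fun x => x) with hvalid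
  have hperm : valid.Perm ys := PySem.List.sorted_perm ys (fun x => x) false
  have hvpw : valid.Pairwise (· ≤ ·) := by
    have := PySem.List.sorted_pairwise ys (fun x => x)
    simpa using this
  have hcounteq : ∀ i : Int, valid.count i = ys.count i := fun i => hperm.count_eq i
  cases hveq : valid with
  | nil =>
      -- ys is empty: A's output has no members either
      rw [hveq] at hperm
      have hysnil : ys = [] := hperm.symm.eq_nil
      have hAnil : Aout = [] := by
        rw [List.eq_nil_iff_forall_not_mem]
        intro i hi
        have := (hmemA i).mp hi
        rw [hysnil] at this
        simp at this
        omega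
      rw [hAnil]
      simp only [List.foldl_nil, pvFlush]
      rw [if_neg (by omega : ¬ thr < (0 : Int))]
  | cons v vs =>
      rw [hveq] at hvpw hcounteq
      have hvle : ∀ x ∈ vs, v ≤ x := fun x hx => (List.pairwise_cons.mp hvpw).1 x hx
      have hvspw : vs.Pairwise (· ≤ ·) := (List.pairwise_cons.mp hvpw).2
      rw [List.foldl_cons]
      have hstep0 : pvStep thr ([], none, 0) v = ([], some v, 1) := by
        simp only [pvStep]
        rw [if_neg (by rintro ⟨h, -⟩; omega)]
        rw [if_neg (by omega : ¬ thr < (0 : Int))]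
      rw [hstep0]
      rw [pv_scan_spec thr vs [] v 1 (by omega) hvle hvspw]
      rw [List.nil_append]
      have h1 : List.replicate (1 : Int).toNat v ++ vs = v :: vs := by
        simp [List.replicate_succ]
      rw [h1]
      set Bout := (PySem.Set.ofList (v :: vs)).filter
          (fun k => decide (thr < (((v :: vs).count k : Nat) : Int))) with hB
      have hBpw : Bout.Pairwise (fun a b => a < b) :=
        (pv_ofList_pairwise_lt (v :: vs) hvpw).filter _
      have hmemB : ∀ i : Int, i ∈ Bout ↔ thr < (ys.count i : Int) := by
        intro i
        rw [hB, List.mem_filter]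
        constructor
        · rintro ⟨-, h⟩
          rw [← hcounteq i]
          simpa using h
        · intro hcnt
          rw [← hcounteq i] at hcnt
          have hpos : 0 < (v :: vs).count i := by
            rcases Nat.eq_zero_or_pos ((v :: vs).count i) with h | h
            · rw [h] at hcnt; simp at hcnt; omega
            · exact h
          refine ⟨?_, by simpa using hcnt⟩
          exact (PySem.Set.mem_ofList _ _).mpr (List.count_pos_iff.mp hpos)
      -- two strictly increasing lists with the same members are equal
      have hpermAB : Aout.Perm Bout := by
        refine (List.perm_ext_iff_of_nodup ?_ ?_).mpr
          (fun i => (hmemA i).trans (hmemB i).symm)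
        · exact hApw.imp (fun h => ne_of_lt h)
        · exact hBpw.imp (fun h => ne_of_lt h)
      have e1 : PySem.List.sorted Bout (fun x => x) = Aout :=
        PySem.List.sorted_eq_of_perm_of_pairwise_lt _ Aout (fun x => x) hpermAB hApw
      have e2 : PySem.List.sorted Bout (fun x => x) = Bout :=
        PySem.List.sorted_eq_self_of_pairwise Bout (fun x => x) (by
          simpa using hBpw.imp (fun h => le_of_lt h))
      rw [← e1, e2]
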